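-- pv_equiv track=rewrite | github.com/bananighosh/dsa_decoded | 484-find-permutation/find-permutation.py | findPermutation
-- ===== SOURCE A (Python) =====
-- from typing import List
--
-- def findPermutation(s: str) -> List[int]:
--
--     res = []
--     stk = []
--     curr = 1
--
--     s += "I"
--
--     for c in s:
--         if c == "I":
--             stk.append(curr)
--             while stk:
--                 res.append(stk.pop())
--         else:
--             stk.append(curr)
--
--         curr += 1
--
--     while stk:
--         res.append(stk.pop())
--
--     return res
-- ===== SOURCE B (Python) =====
-- from typing import List
--
-- def findPermutation(s: str) -> List[int]:
--     # identity permutation, then reverse each maximal run of 'D' (non-'I') characters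
--     n = len(s)
--     res = list(range(1, n + 2))
--     i = 0
--     while i < n:
--         if s[i] == 'I':
--             i += 1
--         else:
--             j = i
--             while j < n and s[j] != 'I':
--                 j += 1
--             res[i:j + 1] = res[i:j + 1][::-1]
--             i = j
--     return res
-- ===== Notes on version B (the rewrite author's own statement) =====
-- stated objective: alternative
-- what changed: Replaces A's stack push/flush construction with building the identity permutation and reversing, in place, the segment spanned by each maximal run of non-'I' characters.
import Mathlib
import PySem

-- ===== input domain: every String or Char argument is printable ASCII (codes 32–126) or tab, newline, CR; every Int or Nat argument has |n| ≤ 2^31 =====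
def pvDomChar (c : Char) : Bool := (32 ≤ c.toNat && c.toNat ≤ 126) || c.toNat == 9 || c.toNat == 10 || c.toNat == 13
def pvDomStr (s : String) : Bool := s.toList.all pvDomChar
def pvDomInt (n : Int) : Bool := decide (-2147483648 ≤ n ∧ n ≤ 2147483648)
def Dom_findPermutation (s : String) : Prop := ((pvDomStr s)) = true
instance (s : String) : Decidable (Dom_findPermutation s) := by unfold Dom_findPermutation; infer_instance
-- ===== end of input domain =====

-- B replaces A's stack push/flush construction by the identity permutation with each
-- maximal non-'I' run reversed in place; same O(n) cost, different algorithm.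


-- ===== PORT A =====
-- the for-loop over s + "I": state (res, stk, curr); 'I' pushes curr then flushes the
-- stack (appending it reversed), otherwise push curr; trailing flush at the end.
def pvLoopA : List Char → List Int → List Int → Int → List Int
  | [], res, stk, _ => res ++ stk.reverse
  | c :: cs, res, stk, curr =>
    if c = 'I' then pvLoopA cs (res ++ (stk ++ [curr]).reverse) [] (curr + 1)
    else pvLoopA cs res (stk ++ [curr]) (curr + 1)

def findPermutation (s : String) : List Int :=
  pvLoopA (s.toList ++ ['I']) [] [] 1

-- ===== PORT B =====
-- inner while: advance j past the run of non-'I' characters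
def pvRunEnd (cl : List Char) (n j : Nat) : Nat :=
  if h : j < n ∧ cl.getD j ' ' ≠ 'I' then pvRunEnd cl n (j + 1) else j
termination_by n - j
decreasing_by omega

theorem pvRunEnd_ge (cl : List Char) (n j : Nat) : j ≤ pvRunEnd cl n j := by
  rw [pvRunEnd]
  split
  · exact Nat.le_trans (Nat.le_succ j) (pvRunEnd_ge cl n (j + 1))
  · exact Nat.le_refl j
termination_by n - j
decreasing_by omega

theorem pvRunEnd_gt (cl : List Char) (n i : Nat) (hi : i < n) (hc : cl.getD i ' ' ≠ 'I') :
    i < pvRunEnd cl n i := by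
  rw [pvRunEnd, dif_pos (And.intro hi hc)]
  exact Nat.lt_of_lt_of_le (Nat.lt_succ_self i) (pvRunEnd_ge cl n (i + 1))

-- outer while over index i: res[i:j+1] = res[i:j+1][::-1] is take/reverse/drop on the list
def pvLoopB (cl : List Char) (n : Nat) (res : List Int) (i : Nat) : List Int :=
  if _hi : i < n then
    if cl.getD i ' ' = 'I' then pvLoopB cl n res (i + 1)
    else
      pvLoopB cl n
        (res.take i ++ ((res.drop i).take (pvRunEnd cl n i + 1 - i)).reverse
          ++ res.drop (pvRunEnd cl n i + 1))
        (pvRunEnd cl n i)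
  else res
termination_by n - i
decreasing_by
  · omega
  · have := pvRunEnd_gt cl n i _hi (by assumption)
    omega

def findPermutation_alt (s : String) : List Int :=
  pvLoopB s.toList s.toList.length
    ((List.range' 1 (s.toList.length + 1)).map (fun (k : Nat) => (k : Int))) 0

-- ===== PRECONDITION & SPEC =====
def Spec_findPermutation (s : String) (out : List Int) : Prop := out = findPermutation_alt s
instance (s : String) (out : List Int) : Decidable (Spec_findPermutation s out) := by unfold Spec_findPermutation; infer_instance

-- ===== CLAIM (what is proved, stated in full; the proofs are below) =====
def Claim_equal_findPermutation : Prop := ∀ (s : String), Dom_findPermutation s → Spec_findPermutation s (findPermutation s)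

-- ===== LEMMAS AND PROOFS =====

-- canonical form of A's loop once the trailing "I" is absorbed
def pvF : List Char → List Int → Int → List Int
  | [], stk, curr => (stk ++ [curr]).reverse
  | c :: cs, stk, curr =>
    if c = 'I' then (stk ++ [curr]).reverse ++ pvF cs [] (curr + 1)
    else pvF cs (stk ++ [curr]) (curr + 1)

theorem pvLoopA_eq (cl : List Char) : ∀ (res stk : List Int) (curr : Int),
    pvLoopA (cl ++ ['I']) res stk curr = res ++ pvF cl stk curr := by
  induction cl with
  | nil => intro res stk curr; simp [pvLoopA, pvF]
  | cons c cs ih =>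
    intro res stk curr
    by_cases hc : c = 'I' <;> simp [pvLoopA, pvF, hc, ih]

theorem pvF_run : ∀ (ds : List Char) (rest : List Char) (stk : List Int) (curr : Int),
    (∀ c ∈ ds, c ≠ 'I') →
    pvF (ds ++ rest) stk curr
      = pvF rest (stk ++ (List.range ds.length).map (fun (m : Nat) => curr + (m : Int))) (curr + ds.length) := by
  intro ds
  induction ds with
  | nil => intro rest stk curr _; simp
  | cons c cs ih =>
    intro rest stk curr h
    have hc : c ≠ 'I' := h c (List.mem_cons_self ..)
    have hcs : ∀ c ∈ cs, c ≠ 'I' := fun x hx => h x (List.mem_cons_of_mem _ hx)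
    simp only [List.cons_append, pvF, if_neg hc, ih rest (stk ++ [curr]) (curr + 1) hcs,
      List.length_cons]
    congr 1
    · rw [List.append_assoc]
      congr 1
      rw [List.range_succ_eq_map, List.map_cons, List.map_map]
      simp only [Nat.cast_zero, add_zero, Function.comp_def, List.singleton_append]
      congr 1
      apply List.map_congr_left
      intro a _
      push_cast; ring
    · push_cast; ring

theorem pvRunEnd_le (cl : List Char) (n j : Nat) (h : j ≤ n) : pvRunEnd cl n j ≤ n := by
  rw [pvRunEnd]
  split
  · exact pvRunEnd_le cl n (j + 1) (by omega)
  · exact h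
termination_by n - j
decreasing_by omega

theorem pvRunEnd_stop (cl : List Char) (n j : Nat) (h : pvRunEnd cl n j < n) :
    cl.getD (pvRunEnd cl n j) ' ' = 'I' := by
  by_cases hcond : j < n ∧ cl.getD j ' ' ≠ 'I'
  · rw [pvRunEnd, dif_pos hcond] at h ⊢
    exact pvRunEnd_stop cl n (j + 1) h
  · rw [pvRunEnd, dif_neg hcond] at h ⊢
    by_contra hne
    exact hcond ⟨h, hne⟩
termination_by n - j
decreasing_by omega

theorem pvRunEnd_run (cl : List Char) (n j : Nat) :
    ∀ m, j ≤ m → m < pvRunEnd cl n j → cl.getD m ' ' ≠ 'I' := by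
  intro m hjm hm
  by_cases hcond : j < n ∧ cl.getD j ' ' ≠ 'I'
  · rw [pvRunEnd, dif_pos hcond] at hm
    rcases Nat.eq_or_lt_of_le hjm with heq | hlt
    · exact heq ▸ hcond.2
    · exact pvRunEnd_run cl n (j + 1) m hlt hm
  · rw [pvRunEnd, dif_neg hcond] at hm
    omega
termination_by n - j
decreasing_by omega

theorem pvIdent_split (i j n : Nat) (hij : i ≤ j) (hjn : j ≤ n) :
    (List.range' (i+1) (n+1-i)).map (fun (k : Nat) => (k : Int))
      = (List.range' (i+1) (j+1-i)).map (fun (k : Nat) => (k : Int))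
        ++ (List.range' (j+2) (n-j)).map (fun (k : Nat) => (k : Int)) := by
  have hlen : n + 1 - i = (j + 1 - i) + (n - j) := by omega
  have hstep : i + 1 + 1 * (j + 1 - i) = j + 2 := by omega
  rw [hlen, ← List.range'_append, hstep, List.map_append]

theorem pvSeg_eq (i j : Nat) (hij : i ≤ j) :
    (List.range' (i+1) (j+1-i)).map (fun (k : Nat) => (k : Int))
      = (List.range (j-i)).map (fun (m : Nat) => ((i : Int) + 1 + (m : Int))) ++ [(j : Int) + 1] := by
  have h : j + 1 - i = (j - i) + 1 := by omega
  rw [h, List.range'_eq_map_range, List.range_succ, List.map_append, List.map_append,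
    List.map_map, List.map_map]
  refine congrArg₂ (· ++ ·) ?_ ?_
  · apply List.map_congr_left
    intro a _
    simp only [Function.comp_apply]
    push_cast; ring
  · simp only [List.map_cons, List.map_nil, Function.comp_apply,
      show i + 1 + (j - i) = j + 1 from by omega]
    push_cast
    rfl

theorem pvLoopB_eq (cl : List Char) (i : Nat) (hin : i ≤ cl.length) (p : List Int)
    (hp : p.length = i) :
    pvLoopB cl cl.length (p ++ (List.range' (i+1) (cl.length + 1 - i)).map (fun (k : Nat) => (k : Int))) i
      = p ++ pvF (cl.drop i) [] ((i : Int) + 1) := by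
  by_cases hi : i < cl.length
  · by_cases hcI : cl.getD i ' ' = 'I'
    · -- 'I' at position i: consume one identity element
      rw [pvLoopB, dif_pos hi, if_pos hcI]
      rw [pvIdent_split i i cl.length (Nat.le_refl i) (Nat.le_of_lt hi)]
      have h1 : i + 1 - i = 1 := by omega
      rw [h1, List.range'_one, List.map_cons, List.map_nil, ← List.append_assoc]
      rw [show i + 2 = (i+1)+1 from by omega,
        show cl.length - i = cl.length + 1 - (i+1) from by omega]
      rw [pvLoopB_eq cl (i+1) hi (p ++ [((i+1 : Nat) : Int)]) (by simp [hp])]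
      have hgi : cl[i] = 'I' := by rw [← List.getD_eq_getElem cl ' ' hi]; exact hcI
      rw [List.drop_eq_getElem_cons hi]
      simp only [pvF, hgi, if_pos, List.nil_append, List.reverse_singleton]
      push_cast
      simp [List.append_assoc]
    · -- a run of non-'I' characters from i to j
      have hij : i < pvRunEnd cl cl.length i := pvRunEnd_gt cl cl.length i hi hcI
      have hjn : pvRunEnd cl cl.length i ≤ cl.length := pvRunEnd_le cl cl.length i (Nat.le_of_lt hi)
      rw [pvLoopB, dif_pos hi, if_neg hcI]
      set j := pvRunEnd cl cl.length i with hjdef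
      have hsplit := pvIdent_split i j cl.length (Nat.le_of_lt hij) hjn
      have ht : ∀ l2 : List Int, (p ++ l2).take i = p := fun l2 => by
        rw [← hp, List.take_left]
      have hd : ∀ l2 : List Int, (p ++ l2).drop i = l2 := fun l2 => by
        rw [← hp, List.drop_left]
      rw [ht, hd, hsplit]
      have hA1len : ((List.range' (i+1) (j+1-i)).map (fun (k : Nat) => (k : Int))).length
          = j+1-i := by simp
      rw [List.take_left' hA1len, ← List.append_assoc]
      have hpA1len : (p ++ (List.range' (i+1) (j+1-i)).map (fun (k : Nat) => (k : Int))).length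
          = j + 1 := by simp [hp]; omega
      rw [List.drop_left' hpA1len]
      -- characterize pvF on the run
      have hdslen : ((cl.drop i).take (j-i)).length = j - i := by simp; omega
      have hdsall : ∀ c ∈ (cl.drop i).take (j-i), c ≠ 'I' := by
        intro c hc
        rw [List.mem_iff_getElem] at hc
        obtain ⟨m, hm, hme⟩ := hc
        have hmlt : m < j - i := by rw [hdslen] at hm; exact hm
        have him : i + m < cl.length := by omega
        have : c = cl[i+m] := by
          rw [← hme, List.getElem_take, List.getElem_drop]
        rw [this, ← List.getD_eq_getElem cl ' ' him]
        exact pvRunEnd_run cl cl.length i (i+m) (by omega) (by omega)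
      have hdrop : cl.drop i = (cl.drop i).take (j-i) ++ cl.drop j := by
        conv_lhs => rw [← List.take_append_drop (j-i) (cl.drop i)]
        rw [List.drop_drop, show i + (j - i) = j from by omega]
      have hcurr : ((i : Int) + 1 + ((j-i : Nat) : Int)) = (j : Int) + 1 := by omega
      have hF : pvF (cl.drop i) [] ((i : Int) + 1)
          = pvF (cl.drop j)
              ((List.range (j-i)).map (fun (m : Nat) => ((i : Int) + 1) + (m : Int)))
              ((j : Int) + 1) := by
        conv_lhs => rw [hdrop]
        rw [pvF_run _ _ _ _ hdsall, hdslen, hcurr, List.nil_append]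
      rw [hF]
      have hA1 : (List.range' (i+1) (j+1-i)).map (fun (k : Nat) => (k : Int))
          = (List.range (j-i)).map (fun (m : Nat) => ((i : Int) + 1 + (m : Int))) ++ [(j : Int) + 1] :=
        pvSeg_eq i j (Nat.le_of_lt hij)
      by_cases hjlen : j < cl.length
      · have hIj : cl.getD j ' ' = 'I' := by
          rw [hjdef]; exact pvRunEnd_stop cl cl.length i (hjdef ▸ hjlen)
        rw [pvLoopB, dif_pos hjlen, if_pos hIj]
        rw [show j + 2 = (j+1)+1 from by omega,
          show cl.length - j = cl.length + 1 - (j+1) from by omega]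
        rw [pvLoopB_eq cl (j+1) (by omega)
          (p ++ ((List.range' (i+1) (j+1-i)).map (fun (k : Nat) => (k : Int))).reverse)
          (by simp [hp]; omega)]
        have hgj : cl[j] = 'I' := by rw [← List.getD_eq_getElem cl ' ' hjlen]; exact hIj
        rw [List.drop_eq_getElem_cons hjlen]
        simp only [pvF, hgj, if_pos]
        rw [hA1]
        push_cast
        simp [List.append_assoc]
      · have hjeq : j = cl.length := by omega
        rw [pvLoopB, dif_neg hjlen]
        have hA2nil : cl.length - j = 0 := by omega
        rw [hA2nil, List.range'_zero, List.map_nil, List.append_nil]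
        have hdj : cl.drop j = [] := List.drop_eq_nil_of_le (by omega)
        rw [hdj]
        simp only [pvF]
        rw [hA1]
  · -- i = cl.length: loop exits, one identity element remains, pvF on [] yields it
    rw [pvLoopB, dif_neg hi]
    have h1 : cl.length + 1 - i = 1 := by omega
    have h2 : cl.drop i = [] := List.drop_eq_nil_of_le (by omega)
    rw [h1, h2, List.range'_one, List.map_cons, List.map_nil]
    simp [pvF]
termination_by cl.length - i
decreasing_by all_goals omega

theorem pvPorts_agree (s : String) : findPermutation s = findPermutation_alt s := by
  unfold findPermutation findPermutation_alt
  rw [pvLoopA_eq, List.nil_append]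
  have h := pvLoopB_eq s.toList 0 (Nat.zero_le _) [] rfl
  simp only [List.nil_append, List.drop_zero, Nat.cast_zero, zero_add,
    Nat.sub_zero] at h
  rw [h]

-- ===== VERDICT =====
theorem findPermutation_spec : Claim_equal_findPermutation := by
  intro s _
  unfold Spec_findPermutation
  exact pvPorts_agree s
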